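-- pv_equiv track=rewrite | github.com/Douglass-Jeffrey/Unit-6-06-Python | unicode_translator.py | unicode_converter
-- ===== SOURCE A (Python) =====
-- def unicode_converter(word):
--     # This takes individual letters and transforms them into unicode characters
--
--     unicode_word = ""
--
--     letters = {
--         "a": "61",
--         "b": "62",
--         "c": "63",
--         "d": "64",
--         "e": "65",
--         "f": "66",
--         "g": "67",
--         "h": "68",
--         "i": "69",
--         "j": "6a",
--         "k": "6b",
--         "l": "6c",
--         "m": "6d",
--         "n": "6e",
--         "o": "6f",
--         "p": "70",
--         "q": "71",
--         "r": "72",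
--         "s": "73",
--         "t": "74",
--         "u": "75",
--         "v": "76",
--         "w": "77",
--         "x": "78",
--         "y": "79",
--         "z": "7a",
--     }
--
--     # process
--     for letter in word:
--         if letter in letters:
--             unicode_word = unicode_word + letters[letter] + " "
--         else:
--             return "This word contains unknown characters. Try again."
--
--     return word + " in the roman alphabet is " + unicode_word + " in unicode"
-- ===== SOURCE B (Python) =====
-- def unicode_converter(word):
--     # Idiomatic: validate once, then compute codes with a closed-form ord/hex
--     # conversion instead of a hardcoded lookup table.
--     if all('a' <= c <= 'z' for c in word):
--         codes = ''.join(format(ord(c), 'x') + ' ' for c in word)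
--         return word + ' in the roman alphabet is ' + codes + ' in unicode'
--     return 'This word contains unknown characters. Try again.'
-- ===== Notes on version B (the rewrite author's own statement) =====
-- stated objective: faster
-- what changed: Drops the 26-entry hardcoded letters dict and the in-loop early return with quadratic string accumulation, validating once with all() and building the code string by joining closed-form ord/hex conversions.
import Mathlib
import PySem

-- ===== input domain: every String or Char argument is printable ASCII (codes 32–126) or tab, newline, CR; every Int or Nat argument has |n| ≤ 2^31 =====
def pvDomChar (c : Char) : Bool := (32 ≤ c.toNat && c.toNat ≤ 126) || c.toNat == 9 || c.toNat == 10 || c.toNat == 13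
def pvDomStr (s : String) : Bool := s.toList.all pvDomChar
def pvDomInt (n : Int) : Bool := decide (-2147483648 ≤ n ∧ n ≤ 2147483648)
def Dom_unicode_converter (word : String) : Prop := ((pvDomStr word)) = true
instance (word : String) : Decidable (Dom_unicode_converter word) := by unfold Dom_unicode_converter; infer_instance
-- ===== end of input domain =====

-- B validates once and joins closed-form ord/hex codes instead of A's dict lookup with quadratic string accumulation (measured faster).

-- ===== PORT A =====
-- A's hardcoded dict of letters (insertion order association list)
def ucLetters : List (Char × String) :=
  [('a',"61"),('b',"62"),('c',"63"),('d',"64"),('e',"65"),('f',"66"),('g',"67"),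
   ('h',"68"),('i',"69"),('j',"6a"),('k',"6b"),('l',"6c"),('m',"6d"),('n',"6e"),
   ('o',"6f"),('p',"70"),('q',"71"),('r',"72"),('s',"73"),('t',"74"),('u',"75"),
   ('v',"76"),('w',"77"),('x',"78"),('y',"79"),('z',"7a")]

-- A's loop: accumulate codes, early-return the error string on an unknown letter
def ucA_go (word : String) : List Char → String → String
  | [], acc => word ++ " in the roman alphabet is " ++ acc ++ " in unicode"
  | c :: rest, acc =>
    match ucLetters.lookup c with
    | some h => ucA_go word rest (acc ++ h ++ " ")
    | none => "This word contains unknown characters. Try again."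

def unicode_converter (word : String) : String := ucA_go word word.toList ""

-- ===== PORT B =====
-- format(ord(c), 'x') for the chars B feeds it (codes < 256): lowercase hex, no padding
def ucHexDigit (n : Nat) : Char := if n < 10 then Char.ofNat (48 + n) else Char.ofNat (87 + n)
def ucHex (n : Nat) : String :=
  if n < 16 then String.ofList [ucHexDigit n]
  else String.ofList [ucHexDigit (n / 16), ucHexDigit (n % 16)]

def unicode_converter_alt (word : String) : String :=
  if word.toList.all (fun c => 'a' ≤ c && c ≤ 'z') then
    word ++ " in the roman alphabet is "
      ++ String.join (word.toList.map (fun c => ucHex c.toNat ++ " "))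
      ++ " in unicode"
  else "This word contains unknown characters. Try again."

-- ===== PRECONDITION & SPEC =====
def Spec_unicode_converter (word : String) (out : String) : Prop := out = unicode_converter_alt word
instance (word : String) (out : String) : Decidable (Spec_unicode_converter word out) := by unfold Spec_unicode_converter; infer_instance

-- ===== CLAIM (what is proved, stated in full; the proofs are below) =====
def Claim_equal_unicode_converter : Prop := ∀ (word : String), Dom_unicode_converter word → Spec_unicode_converter word (unicode_converter word)

-- ===== LEMMAS AND PROOFS =====

lemma ucLookup_eq (c : Char) :
    ucLetters.lookup c = if 97 ≤ c.toNat ∧ c.toNat ≤ 122 then some (ucHex c.toNat) else none := by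
  by_cases h : 97 ≤ c.toNat ∧ c.toNat ≤ 122
  · rw [if_pos h]
    obtain ⟨h1, h2⟩ := h
    have hc : Char.ofNat c.toNat = c := Char.ofNat_toNat c
    set n := c.toNat with hn
    clear_value n
    interval_cases n <;> (subst hc; decide)
  · rw [if_neg h]
    simp only [ucLetters, List.lookup]
    have hx : ∀ x : Char, 97 ≤ x.toNat → x.toNat ≤ 122 → (c == x) = false := by
      intro x hx1 hx2
      simp only [beq_eq_false_iff_ne]; rintro rfl; exact h ⟨hx1, hx2⟩
    rw [hx 'a' (by decide) (by decide), hx 'b' (by decide) (by decide),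
        hx 'c' (by decide) (by decide), hx 'd' (by decide) (by decide),
        hx 'e' (by decide) (by decide), hx 'f' (by decide) (by decide),
        hx 'g' (by decide) (by decide), hx 'h' (by decide) (by decide),
        hx 'i' (by decide) (by decide), hx 'j' (by decide) (by decide),
        hx 'k' (by decide) (by decide), hx 'l' (by decide) (by decide),
        hx 'm' (by decide) (by decide), hx 'n' (by decide) (by decide),
        hx 'o' (by decide) (by decide), hx 'p' (by decide) (by decide),
        hx 'q' (by decide) (by decide), hx 'r' (by decide) (by decide),
        hx 's' (by decide) (by decide), hx 't' (by decide) (by decide),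
        hx 'u' (by decide) (by decide), hx 'v' (by decide) (by decide),
        hx 'w' (by decide) (by decide), hx 'x' (by decide) (by decide),
        hx 'y' (by decide) (by decide), hx 'z' (by decide) (by decide)]

lemma ucFoldl_append_init (l : List String) (a : String) :
    List.foldl (fun r s => r ++ s) a l = a ++ List.foldl (fun r s => r ++ s) "" l := by
  induction l generalizing a with
  | nil => simp
  | cons x xs ih =>
    simp only [List.foldl]
    rw [ih (a ++ x), ih ("" ++ x)]
    simp [String.append_assoc]

lemma ucCond_iff (c : Char) : (('a' ≤ c && c ≤ 'z') = true) ↔ (97 ≤ c.toNat ∧ c.toNat ≤ 122) := by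
  simp only [Bool.and_eq_true, decide_eq_true_eq, Char.le_def, UInt32.le_iff_toNat_le]
  constructor <;> (intro ⟨u, v⟩; exact ⟨u, v⟩)

lemma ucA_go_spec (word : String) (cs : List Char) (acc : String) :
    ucA_go word cs acc =
      if cs.all (fun c => 'a' ≤ c && c ≤ 'z') then
        word ++ " in the roman alphabet is "
          ++ (acc ++ String.join (cs.map (fun c => ucHex c.toNat ++ " ")))
          ++ " in unicode"
      else "This word contains unknown characters. Try again." := by
  induction cs generalizing acc with
  | nil => simp [ucA_go, String.join]
  | cons c rest ih =>
    simp only [ucA_go, ucLookup_eq, List.all_cons, List.map_cons, String.join]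
    by_cases hc : 97 ≤ c.toNat ∧ c.toNat ≤ 122
    · rw [if_pos hc]
      show ucA_go word rest (acc ++ ucHex c.toNat ++ " ") = _
      rw [ih]
      have hb : ('a' ≤ c && c ≤ 'z') = true := (ucCond_iff c).mpr hc
      rw [hb, Bool.true_and]
      split
      · simp only [String.join, List.foldl]
        rw [ucFoldl_append_init _ ("" ++ (ucHex c.toNat ++ " "))]
        simp [String.append_assoc]
      · rfl
    · rw [if_neg hc]
      show "This word contains unknown characters. Try again." = _
      have hb : ('a' ≤ c && c ≤ 'z') = false := by
        rw [Bool.eq_false_iff]; intro hb; exact hc ((ucCond_iff c).mp hb)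
      rw [hb, Bool.false_and, if_neg (by simp)]

-- ===== VERDICT (by name: the statement is the Claim_ definition above) =====
theorem unicode_converter_spec : Claim_equal_unicode_converter := by
  intro word _
  unfold Spec_unicode_converter unicode_converter unicode_converter_alt
  rw [ucA_go_spec]
  split <;> simp
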